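-- pv_equiv track=rewrite | github.com/IGNN1TEM3/igi-repository | IGI/LR3/python_lab3/task5.py | second_subtask
-- ===== SOURCE A (Python) =====
-- def second_subtask(lst):
--     """Returns the product of the elements located between the first and second zero elements or None"""
--     try:
--         start = lst.index(0) + 1
--         end = lst.index(0, start)
--
--         if start == end:
--             return None
--
--         product = 1
--         for i in lst[start:end]:
--             product *= i
--         return product
--     except ValueError:
--         return None
-- ===== SOURCE B (Python) =====
-- def second_subtask(lst):
--     """Returns the product of the elements located between the first and second zero elements or None"""
--     zeros = 0
--     product = 1
--     accumulated = False
--     for x in lst: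
--         if x == 0:
--             zeros += 1
--             if zeros == 2:
--                 break
--         elif zeros == 1:
--             product *= x
--             accumulated = True
--     if zeros < 2 or not accumulated:
--         return None
--     return product
-- ===== Notes on version B (the rewrite author's own statement) =====
-- stated objective: alternative
-- what changed: Replaces the two list.index scans plus a slice copy and a product loop with a single fused pass that counts zeros and multiplies elements after the first zero, stopping at the second zero.
import Mathlib
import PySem

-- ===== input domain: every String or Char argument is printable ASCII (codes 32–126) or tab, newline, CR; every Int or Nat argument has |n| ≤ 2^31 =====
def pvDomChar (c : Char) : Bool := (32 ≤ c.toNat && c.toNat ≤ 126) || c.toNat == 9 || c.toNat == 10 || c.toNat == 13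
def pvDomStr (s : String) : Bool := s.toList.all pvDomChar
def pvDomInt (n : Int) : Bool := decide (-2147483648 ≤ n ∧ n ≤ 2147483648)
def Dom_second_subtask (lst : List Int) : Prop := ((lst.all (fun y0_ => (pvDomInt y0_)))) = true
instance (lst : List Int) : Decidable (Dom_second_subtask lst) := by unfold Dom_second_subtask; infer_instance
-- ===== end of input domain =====

-- B fuses A's two index scans, slice and product loop into one state-machine pass (alternative decomposition, same cost).

-- ===== PORT A =====
-- lst.index(0) → PySem.List.index?; lst.index(0, start) = start + index of 0 in lst.drop start
-- (exact: Python searches from position `start`); a ValueError from either is the `none` branch.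
def second_subtask (lst : List Int) : Option Int :=
  match PySem.List.index? lst 0 with
  | none => none
  | some i =>
    let start : Nat := i + 1
    match PySem.List.index? (lst.drop start) 0 with
    | none => none
    | some j =>
      let stop : Nat := start + j
      if start = stop then none
      else some ((PySem.List.slice lst (some (start : Int)) (some (stop : Int))).foldl (· * ·) 1)

-- ===== PORT B =====
-- state after the first zero: running product, flag whether anything was accumulated
def sndAcc : List Int → Int → Bool → Option Int
  | [], _, _ => none
  | x :: xs, p, acc => if x = 0 then (if acc then some p else none) else sndAcc xs (p * x) true

-- before the first zero
def second_subtask_alt (lst : List Int) : Option Int :=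
  match lst with
  | [] => none
  | x :: xs => if x = 0 then sndAcc xs 1 false else second_subtask_alt xs

-- ===== PRECONDITION & SPEC =====
def Spec_second_subtask (lst : List Int) (out : Option Int) : Prop := out = second_subtask_alt lst
instance (lst : List Int) (out : Option Int) : Decidable (Spec_second_subtask lst out) := by unfold Spec_second_subtask; infer_instance

-- ===== CLAIM (what is proved, stated in full; the proofs are below) =====
def Claim_equal_second_subtask : Prop := ∀ (lst : List Int), Dom_second_subtask lst → Spec_second_subtask lst (second_subtask lst)

-- ===== LEMMAS AND PROOFS =====

theorem sndAcc_char (xs : List Int) : ∀ (p : Int) (b : Bool),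
    sndAcc xs p b =
      match PySem.List.index? xs 0 with
      | none => none
      | some j => if j = 0 ∧ b = false then none else some ((xs.take j).foldl (· * ·) p) := by
  induction xs with
  | nil => intro p b; simp [sndAcc, PySem.List.index?]
  | cons x xs ih =>
    intro p b
    by_cases hx : x = 0
    · subst hx
      rw [PySem.List.index?_cons_self]
      cases b <;> simp [sndAcc]
    · rw [PySem.List.index?_cons_of_ne _ hx]
      simp only [sndAcc, if_neg hx, ih (p * x) true]
      cases h : PySem.List.index? xs 0 with
      | none => simp
      | some j => simp

theorem second_subtask_eq_alt (lst : List Int) : second_subtask lst = second_subtask_alt lst := by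
  induction lst with
  | nil => simp [second_subtask, second_subtask_alt, PySem.List.index?]
  | cons x xs ih =>
    by_cases hx : x = 0
    · subst hx
      simp only [second_subtask, PySem.List.index?_cons_self, second_subtask_alt]
      rw [sndAcc_char xs 1 false]
      simp only [List.drop_succ_cons, List.drop_zero]
      cases h : PySem.List.index? xs 0 with
      | none => rfl
      | some j =>
        simp only []
        by_cases hj : j = 0
        · subst hj; simp
        · have h1 : ¬ (1 : Nat) = 1 + j := by omega
          simp only [if_neg h1, hj, and_true]
          have : ((1 : Nat) : Int) + (j : Int) = ((1 + j : Nat) : Int) := by push_cast; ring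
          rw [show (((1 + j : Nat)) : Int) = ((1 : Nat) : Int) + ((j : Nat) : Int) by push_cast; ring,
              PySem.List.slice_natCast_add]
          simp
    · simp only [second_subtask_alt, if_neg hx]
      rw [← ih]
      simp only [second_subtask]
      rw [PySem.List.index?_cons_of_ne _ hx]
      cases hi : PySem.List.index? xs 0 with
      | none => rfl
      | some i =>
        simp only [Option.map_some]
        have hd : (x :: xs).drop (i + 1 + 1) = xs.drop (i + 1) := by simp
        rw [hd]
        cases hj : PySem.List.index? (xs.drop (i + 1)) 0 with
        | none => rfl
        | some j =>
          simp only []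
          have heq : (i + 1 + 1 = i + 1 + 1 + j) ↔ (i + 1 = i + 1 + j) := by omega
          by_cases hc : i + 1 = i + 1 + j
          · rw [if_pos (by omega), if_pos hc]
          · rw [if_neg (by omega), if_neg hc]
            congr 1
            rw [show (((i + 1 + 1 + j : Nat)) : Int) = ((i + 1 + 1 : Nat) : Int) + ((j : Nat) : Int) by push_cast; ring,
                PySem.List.slice_natCast_add,
                show (((i + 1 + j : Nat)) : Int) = ((i + 1 : Nat) : Int) + ((j : Nat) : Int) by push_cast; ring,
                PySem.List.slice_natCast_add]
            simp

-- ===== VERDICT (by name: the statement is the Claim_ definition above) =====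
theorem second_subtask_spec : Claim_equal_second_subtask := by
  intro lst _
  unfold Spec_second_subtask
  exact second_subtask_eq_alt lst
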